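-- pv_equiv track=rewrite | github.com/dnialh/advent-of-code-2024 | 17.py | solve
-- ===== SOURCE A (Python) =====
-- def solve(z, prog):
--     if prog == []:
--         return z
--
--     z *= 8
--
--     *pp, v = prog
--     for b in range(8):
--         poss = (v ^ 3 ^ ((z + b) >> (b ^ 5))) & 7
--         if poss == b:
--             rec = solve(z + b, pp)
--             if rec:
--                 return rec
-- ===== SOURCE B (Python) =====
-- def solve(z, prog):
--     if not prog:
--         return z
--     stack = [(z, prog)]
--     while stack:
--         z, prog = stack.pop()
--         if not prog:
--             if z:
--                 return z
--             continue
--         z8 = z * 8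
--         *pp, v = prog
--         for b in reversed(range(8)):
--             if (v ^ 3 ^ ((z8 + b) >> (b ^ 5))) & 7 == b:
--                 stack.append((z8 + b, pp))
--     return None
-- ===== Notes on version B (the rewrite author's own statement) =====
-- stated objective: alternative
-- what changed: Replaced A's recursion (with result bubbling through 'if rec: return rec') by an iterative depth-first search over an explicit stack of (z, remaining_prog) states, pushing candidate digits in reverse so the visit order is identical.
import Mathlib
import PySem

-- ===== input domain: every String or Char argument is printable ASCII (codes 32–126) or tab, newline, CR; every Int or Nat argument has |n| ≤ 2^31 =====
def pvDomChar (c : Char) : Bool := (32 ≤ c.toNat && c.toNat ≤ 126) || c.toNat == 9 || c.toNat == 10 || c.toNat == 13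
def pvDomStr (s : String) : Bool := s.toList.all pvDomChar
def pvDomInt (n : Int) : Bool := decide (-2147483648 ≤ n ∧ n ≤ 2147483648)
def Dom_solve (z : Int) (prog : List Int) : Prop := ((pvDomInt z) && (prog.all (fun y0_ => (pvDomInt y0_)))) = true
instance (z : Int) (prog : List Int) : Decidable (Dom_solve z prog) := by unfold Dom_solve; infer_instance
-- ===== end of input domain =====

-- B replaces A's recursion with an explicit stack-based iterative DFS (same visit order, same values); objective: alternative decomposition.

-- ===== PORT A =====
-- A recurses on prog minus its last element; the fuel argument is prog.length, which
-- always suffices, so this is a literal transliteration of A's recursion.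
mutual
  def solveA : Nat → Int → List Int → Option Int
    | _, z, [] => some z
    | 0, _, _ => none          -- unreachable when fuel ≥ prog.length
    | n+1, z, prog =>
        (List.range 8).foldl (tryA n (z * 8) prog.getLast! prog.dropLast) none
  termination_by n _ _ => (n, 0)
  -- one iteration of A's `for b in range(8)` body, with early-return carried in the accumulator
  def tryA : Nat → Int → Int → List Int → Option Int → Nat → Option Int
    | n, z8, v, pp, acc, b =>
      match acc with
      | some r => some r
      | none =>
        if PySem.Int.band (PySem.Int.bxor (PySem.Int.bxor v 3) ((z8 + (b : Int)) >>> (b ^^^ 5))) 7 = (b : Int) then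
          match solveA n (z8 + (b : Int)) pp with
          | some r => if r ≠ 0 then some r else none   -- `if rec:` — 0 counts as failure
          | none => none
        else none
  termination_by n _ _ _ _ _ => (n, 1)
end

def solve (z : Int) (prog : List Int) : Option Int := solveA prog.length z prog

-- ===== PORT B =====
-- the candidate digits b pushed for one popped state (ascending b = pop order of Python's reversed pushes)
def pushes (z8 v : Int) (pp : List Int) : List (Int × List Int) :=
  ((List.range 8).filter (fun b : Nat =>
      PySem.Int.band (PySem.Int.bxor (PySem.Int.bxor v 3) ((z8 + (b : Int)) >>> (b ^^^ 5))) 7 == (b : Int))).map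
    (fun b : Nat => (z8 + (b : Int), pp))

-- termination measure helper for the DFS stack (cited by solveLoop's decreasing_by)
theorem pushes_lt (z8 v : Int) (a : Int) (t : List Int) :
    (List.map (fun s : Int × List Int => 9 ^ (s.2.length + 1)) (pushes z8 v ((a :: t).dropLast))).sum
      < 9 ^ ((a :: t).length + 1) := by
  have hsum : ∀ (fs : List Nat) (pp : List Int),
      (List.map (fun s : Int × List Int => 9 ^ (s.2.length + 1))
        (fs.map (fun b : Nat => (z8 + (b : Int), pp)))).sum = fs.length * 9 ^ (pp.length + 1) := by
    intro fs pp
    induction fs with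
    | nil => simp
    | cons x xs ih => rw [List.map_cons, List.map_cons, List.sum_cons, ih, List.length_cons]; ring_nf
  have hlen : ((List.range 8).filter (fun b : Nat =>
      PySem.Int.band (PySem.Int.bxor (PySem.Int.bxor v 3) ((z8 + (b : Int)) >>> (b ^^^ 5))) 7 == (b : Int))).length ≤ 8 := by
    simpa using List.length_filter_le _ _
  unfold pushes
  rw [hsum]
  simp only [List.length_dropLast, List.length_cons, Nat.add_sub_cancel]
  have h9 : 0 < 9 ^ (t.length + 1) := pow_pos (by norm_num : (0:ℕ) < 9) _
  have he : 9 ^ (t.length + 1 + 1) = 9 * 9 ^ (t.length + 1) := by ring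
  nlinarith [hlen, h9]

-- iterative DFS over an explicit stack of (z, remaining_prog) states
def solveLoop : List (Int × List Int) → Option Int
  | [] => none
  | (z, prog) :: rest =>
    match prog with
    | [] => if z ≠ 0 then some z else solveLoop rest
    | q :: qs => solveLoop (pushes (z * 8) ((q :: qs).getLast!) ((q :: qs).dropLast) ++ rest)
termination_by st => (st.map (fun s => 9 ^ (s.2.length + 1))).sum
decreasing_by
  · simp
  · simp only [List.map_append, List.sum_append, List.map_cons, List.sum_cons]
    exact Nat.add_lt_add_right (pushes_lt _ _ _ _) _

def solve_alt (z : Int) (prog : List Int) : Option Int :=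
  if prog = [] then some z else solveLoop [(z, prog)]

-- ===== PRECONDITION & SPEC =====
def Spec_solve (z : Int) (prog : List Int) (out : Option Int) : Prop := out = solve_alt z prog
instance (z : Int) (prog : List Int) (out : Option Int) : Decidable (Spec_solve z prog out) := by unfold Spec_solve; infer_instance

-- ===== CLAIM (what is proved, stated in full; the proofs are below) =====
def Claim_equal_solve : Prop := ∀ (z : Int) (prog : List Int), Dom_solve z prog → Spec_solve z prog (solve z prog)

-- ===== LEMMAS AND PROOFS =====

theorem solveA_nil (n : Nat) (z : Int) : solveA n z [] = some z := by
  cases n <;> simp [solveA]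

theorem foldl_tryA_some (n : Nat) (z8 v : Int) (pp : List Int) (bs : List Nat) (r : Int) :
    bs.foldl (tryA n z8 v pp) (some r) = some r := by
  induction bs with
  | nil => rfl
  | cons b bs ih => simp [List.foldl_cons, tryA, ih]

theorem tryA_none_ne_zero (n : Nat) (z8 v : Int) (pp : List Int) (b : Nat) (a : Int)
    (h : tryA n z8 v pp none b = some a) : a ≠ 0 := by
  unfold tryA at h
  simp only at h
  split at h
  · split at h
    · split at h
      · rename_i hne
        cases h
        simpa using hne
      · exact absurd h (by simp)
    · exact absurd h (by simp)
  · exact absurd h (by simp)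

theorem foldl_tryA_ne_zero (n : Nat) (z8 v : Int) (pp : List Int) (bs : List Nat)
    (acc : Option Int) (hacc : ∀ a, acc = some a → a ≠ 0) (r : Int)
    (h : bs.foldl (tryA n z8 v pp) acc = some r) : r ≠ 0 := by
  induction bs generalizing acc with
  | nil => exact hacc r h
  | cons b bs ih =>
    refine ih (tryA n z8 v pp acc b) ?_ h
    intro a ha
    cases acc with
    | some x =>
      have hx : tryA n z8 v pp (some x) b = some x := by simp [tryA]
      rw [hx] at ha
      cases ha
      exact hacc a rfl
    | none => exact tryA_none_ne_zero n z8 v pp b a ha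

theorem solve_key (n : Nat) : ∀ (z : Int) (prog : List Int) (rest : List (Int × List Int)),
    prog.length ≤ n →
    solveLoop ((z, prog) :: rest) =
      match solveA n z prog with
      | none => solveLoop rest
      | some r => if r = 0 then solveLoop rest else some r := by
  induction n with
  | zero =>
    intro z prog rest h
    have hp : prog = [] := by cases prog <;> simp_all
    subst hp
    by_cases hz : z = 0 <;> simp [solveLoop, solveA_nil, hz]
  | succ m ih =>
    intro z prog rest h
    cases prog with
    | nil => by_cases hz : z = 0 <;> simp [solveLoop, solveA_nil, hz]
    | cons a t =>
      have hpp : (a :: t).dropLast.length ≤ m := by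
        simp only [List.length_dropLast, List.length_cons] at *
        omega
      rw [solveLoop]
      show solveLoop (pushes (z * 8) (a :: t).getLast! (a :: t).dropLast ++ rest) = _
      have hA : solveA (m + 1) z (a :: t)
          = (List.range 8).foldl (tryA m (z * 8) (a :: t).getLast! (a :: t).dropLast) none := by
        rw [solveA]
        simp
      rw [hA]
      generalize (z * 8) = z8 at *
      generalize (a :: t).getLast! = v
      generalize hq : (a :: t).dropLast = pp at hpp
      have inner : ∀ (bs : List Nat) (rest : List (Int × List Int)),
          solveLoop (((bs.filter (fun b : Nat =>
              PySem.Int.band (PySem.Int.bxor (PySem.Int.bxor v 3) ((z8 + (b : Int)) >>> (b ^^^ 5))) 7 == (b : Int))).map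
                (fun b : Nat => (z8 + (b : Int), pp))) ++ rest) =
            match bs.foldl (tryA m z8 v pp) none with
            | none => solveLoop rest
            | some r => if r = 0 then solveLoop rest else some r := by
        intro bs
        induction bs with
        | nil => intro rest; simp
        | cons b bs ihb =>
          intro rest
          by_cases hc : PySem.Int.band (PySem.Int.bxor (PySem.Int.bxor v 3) ((z8 + (b : Int)) >>> (b ^^^ 5))) 7 = (b : Int)
          · have hfilter : (b :: bs).filter (fun b : Nat =>
                PySem.Int.band (PySem.Int.bxor (PySem.Int.bxor v 3) ((z8 + (b : Int)) >>> (b ^^^ 5))) 7 == (b : Int))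
                = b :: bs.filter (fun b : Nat =>
                PySem.Int.band (PySem.Int.bxor (PySem.Int.bxor v 3) ((z8 + (b : Int)) >>> (b ^^^ 5))) 7 == (b : Int)) := by
              simp [hc]
            rw [hfilter, List.map_cons, List.cons_append]
            rw [ih (z8 + (b : Int)) pp _ hpp]
            have htry : tryA m z8 v pp none b
                = match solveA m (z8 + (b : Int)) pp with
                  | some r => if r ≠ 0 then some r else none
                  | none => none := by
              unfold tryA; simp [hc]
            rw [List.foldl_cons, htry]
            cases hres : solveA m (z8 + (b : Int)) pp with
            | none => exact ihb rest
            | some r =>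
              by_cases hr : r = 0
              · simp only [hr, ne_eq, not_true_eq_false, if_false]
                exact ihb rest
              · simp only [if_neg hr, if_pos (by simpa using hr)]
                rw [foldl_tryA_some]
                simp [hr]
          · have hfilter : (b :: bs).filter (fun b : Nat =>
                PySem.Int.band (PySem.Int.bxor (PySem.Int.bxor v 3) ((z8 + (b : Int)) >>> (b ^^^ 5))) 7 == (b : Int))
                = bs.filter (fun b : Nat =>
                PySem.Int.band (PySem.Int.bxor (PySem.Int.bxor v 3) ((z8 + (b : Int)) >>> (b ^^^ 5))) 7 == (b : Int)) := by
              simp [hc]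
            have htry : tryA m z8 v pp none b = none := by
              unfold tryA; simp [hc]
            rw [hfilter, List.foldl_cons, htry]
            exact ihb rest
      exact inner (List.range 8) rest

-- ===== VERDICT (by name: the statement is the Claim_ definition above) =====
theorem solve_spec : Claim_equal_solve := by
  intro z prog _
  unfold Spec_solve solve solve_alt
  cases prog with
  | nil => simp [solveA_nil]
  | cons a t =>
    rw [if_neg (by simp)]
    rw [solve_key (a :: t).length z (a :: t) [] le_rfl]
    cases hres : solveA (a :: t).length z (a :: t) with
    | none => simp [solveLoop]
    | some r =>
      have hr : r ≠ 0 := by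
        simp only [List.length_cons] at hres
        have hA : solveA (t.length + 1) z (a :: t)
            = (List.range 8).foldl (tryA t.length (z * 8) (a :: t).getLast! (a :: t).dropLast) none := by
          rw [solveA]
          simp
        rw [hA] at hres
        exact foldl_tryA_ne_zero _ _ _ _ _ none (by simp) r hres
      simp [hr]
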